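-- pv_equiv track=rewrite | github.com/username5012/TIL-LOG-_Programmers | 프로그래머스/lv0/120815. 피자 나눠 먹기 （2）/피자 나눠 먹기 （2）.py | solution
-- ===== SOURCE A (Python) =====
-- def solution(n):
--     answer = 0
--     A = 0
--     B = 0
--     C = 0
--     if n % 6 == 0:
--         answer = n // 6
--     else:
--         for i in range (1, (6*n+1)):
--             if i % 6 == 0 and i % n == 0:
--                 answer = i // 6
--                 break
--
--     return answer
-- ===== SOURCE B (Python) =====
-- # O(1) closed form: 6 = 2*3, so the number of pizzas is n // gcd(6, n),
-- # and gcd(6, n) is 2-if-n-even times 3-if-n-divisible-by-3.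
-- def solution(n):
--     g = (2 if n % 2 == 0 else 1) * (3 if n % 3 == 0 else 1)
--     return n // g
-- ===== Notes on version B (the rewrite author's own statement) =====
-- stated objective: faster
-- what changed: Replaces the O(n) scan for the first common multiple of 6 and n with the closed form n // gcd(6,n), with gcd(6,n) computed directly from divisibility by 2 and 3.
-- outside the precondition, e.g. on solution(-5): A returns 0, B returns -5
import Mathlib
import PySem

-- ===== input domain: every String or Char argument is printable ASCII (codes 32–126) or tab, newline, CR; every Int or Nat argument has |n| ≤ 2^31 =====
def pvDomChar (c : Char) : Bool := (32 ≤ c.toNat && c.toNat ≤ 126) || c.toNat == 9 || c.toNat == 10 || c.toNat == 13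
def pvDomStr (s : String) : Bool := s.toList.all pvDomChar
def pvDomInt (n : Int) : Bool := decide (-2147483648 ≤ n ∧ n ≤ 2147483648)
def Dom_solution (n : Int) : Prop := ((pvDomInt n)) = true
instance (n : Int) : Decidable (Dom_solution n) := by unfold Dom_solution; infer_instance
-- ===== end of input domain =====

-- B replaces A's O(n) scan for the first common multiple of 6 and n with the O(1)
-- closed form n // gcd(6,n), gcd(6,n) read off from divisibility by 2 and 3.


-- ===== PORT A =====
-- the for-loop with break: first i in the range with i % 6 == 0 and i % n == 0 yields i // 6,
-- otherwise answer stays 0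
def solutionLoop (n : Int) : List Int → Int
  | [] => 0
  | i :: rest =>
      if PySem.Int.mod i 6 == 0 && PySem.Int.mod i n == 0 then PySem.Int.floordiv i 6
      else solutionLoop n rest

def solution (n : Int) : Int :=
  if PySem.Int.mod n 6 == 0 then PySem.Int.floordiv n 6
  else solutionLoop n (PySem.List.pyRange 1 (6 * n + 1) 1)

-- ===== PORT B =====
def solution_alt (n : Int) : Int :=
  let g : Int := (if PySem.Int.mod n 2 == 0 then 2 else 1) * (if PySem.Int.mod n 3 == 0 then 3 else 1)
  PySem.Int.floordiv n g

-- ===== PRECONDITION & SPEC =====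
-- Pre_ restricts to the natural domain of a people count (n ≥ 0): for negative n not
-- divisible by 6 A's range is empty and it returns the leftover 0, an artefact of its loop.
def Pre_solution (n : Int) : Prop := 0 ≤ n
instance (n : Int) : Decidable (Pre_solution n) := by unfold Pre_solution; infer_instance
def pvWitness_solution : Int := (10)

def Spec_solution (n : Int) (out : Int) : Prop := out = solution_alt n
instance (n : Int) (out : Int) : Decidable (Spec_solution n out) := by unfold Spec_solution; infer_instance

-- ===== CLAIM (what is proved, stated in full; the proofs are below) =====
def Claim_equal_solution : Prop := ∀ (n : Int), Dom_solution n → Pre_solution n → Spec_solution n (solution n)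

-- ===== LEMMAS AND PROOFS =====

-- The loop returns L/6 for L the least positive common multiple of 6 and n in the range.
theorem solutionLoop_finds (n L : Int) (h6 : (6:Int) ∣ L) (hdn : n ∣ L)
    (hmin : ∀ j : Int, 1 ≤ j → j < L → ¬((6:Int) ∣ j ∧ n ∣ j)) :
    ∀ k : Nat, ∀ a : Int, (L - a).toNat = k → 1 ≤ a → a ≤ L → L ≤ 6 * n →
      solutionLoop n (PySem.List.pyRange a (6 * n + 1) 1) = PySem.Int.floordiv L 6 := by
  intro k
  induction k using Nat.strong_induction_on with
  | _ k ih =>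
    intro a hk ha haL hL6n
    have hab : a < 6 * n + 1 := by omega
    rw [PySem.List.pyRange_one_cons hab]
    by_cases hA : a = L
    · subst hA
      have h1 : PySem.Int.mod a 6 = 0 := (PySem.Int.mod_eq_zero_iff_dvd a 6).mpr h6
      have h2 : PySem.Int.mod a n = 0 := (PySem.Int.mod_eq_zero_iff_dvd a n).mpr hdn
      have hT : (PySem.Int.mod a 6 == 0 && PySem.Int.mod a n == 0) = true := by
        rw [h1, h2]; decide
      simp only [solutionLoop, hT, if_true]
    · have haL2 : a < L := lt_of_le_of_ne haL hA
      have hnc := hmin a ha haL2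
      have hF : (PySem.Int.mod a 6 == 0 && PySem.Int.mod a n == 0) = false := by
        by_cases hma : PySem.Int.mod a 6 = 0
        · by_cases hmb : PySem.Int.mod a n = 0
          · exact absurd ⟨(PySem.Int.mod_eq_zero_iff_dvd a 6).mp hma,
                          (PySem.Int.mod_eq_zero_iff_dvd a n).mp hmb⟩ hnc
          · rw [beq_eq_false_iff_ne.mpr hmb, Bool.and_false]
        · rw [beq_eq_false_iff_ne.mpr hma, Bool.false_and]
      simp only [solutionLoop, hF, Bool.false_eq_true, if_false]
      exact ih (L - (a + 1)).toNat (by omega) (a + 1) rfl (by omega) (by omega) hL6n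

-- the whole else-branch of A, for n = g * d with 6 = g * c and 6*d a least common multiple
theorem loop_value (n g c d : Int) (hn1 : 1 ≤ n)
    (hd : n = g * d) (hc : 6 = g * c) (hgpos : 0 < g)
    (hmin : ∀ j : Int, 1 ≤ j → j < 6 * d → ¬((6:Int) ∣ j ∧ n ∣ j)) :
    solutionLoop n (PySem.List.pyRange 1 (6 * n + 1) 1) = d := by
  have hd1 : 1 ≤ d := by nlinarith
  have hc1 : 1 ≤ c := by nlinarith
  have h6L : (6:Int) ∣ 6 * d := ⟨d, rfl⟩
  have hnL : n ∣ 6 * d := ⟨c, by rw [hd, hc]; ring⟩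
  have hL6n : 6 * d ≤ 6 * n := by nlinarith
  rw [solutionLoop_finds n (6 * d) h6L hnL hmin (6 * d - 1).toNat 1 rfl (by omega)
        (by omega) hL6n]
  rw [PySem.Int.floordiv_eq_ediv_of_pos (by norm_num : (0:Int) < 6)]
  exact Int.mul_ediv_cancel_left d (by norm_num)

-- a prime p with ¬p ∣ n divides t whenever it divides n * t
theorem prime_dvd_cofactor (p : Nat) (hp : Nat.Prime p) (n t : Int)
    (hnd : ¬(p:Int) ∣ n) (h : (p:Int) ∣ n * t) : (p:Int) ∣ t := by
  rcases Int.Prime.dvd_mul' hp h with h1 | h1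
  · exact absurd h1 hnd
  · exact h1

theorem solution_eq_alt (n : Int) (hn : 0 ≤ n) : solution n = solution_alt n := by
  unfold solution solution_alt
  by_cases h6n : (6:Int) ∣ n
  · have h2 : (2:Int) ∣ n := by omega
    have h3 : (3:Int) ∣ n := by omega
    have e6 : PySem.Int.mod n 6 = 0 := (PySem.Int.mod_eq_zero_iff_dvd n 6).mpr h6n
    have e2 : PySem.Int.mod n 2 = 0 := (PySem.Int.mod_eq_zero_iff_dvd n 2).mpr h2
    have e3 : PySem.Int.mod n 3 = 0 := (PySem.Int.mod_eq_zero_iff_dvd n 3).mpr h3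
    rw [e6, e2, e3]
    norm_num
  · have hn1 : 1 ≤ n := by
      rcases lt_or_eq_of_le hn with h | h
      · omega
      · exact absurd (h ▸ dvd_zero 6) h6n
    have e6 : ¬ PySem.Int.mod n 6 = 0 :=
      fun h => h6n ((PySem.Int.mod_eq_zero_iff_dvd n 6).mp h)
    have hIf : (PySem.Int.mod n 6 == 0) = false := by
      cases hb : (PySem.Int.mod n 6 == 0)
      · rfl
      · exact absurd (by simpa using hb) e6
    rw [hIf]
    simp only [Bool.false_eq_true, if_false]
    by_cases h2 : (2:Int) ∣ n <;> by_cases h3 : (3:Int) ∣ n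
    · exact absurd (by omega : (6:Int) ∣ n) h6n
    · -- g = 2 : n = 2*m, L = 6*m = 3*n
      have e2 : PySem.Int.mod n 2 = 0 := (PySem.Int.mod_eq_zero_iff_dvd n 2).mpr h2
      have e3 : ¬ PySem.Int.mod n 3 = 0 :=
        fun h => h3 ((PySem.Int.mod_eq_zero_iff_dvd n 3).mp h)
      rcases h2 with ⟨m, hm⟩
      have hmin : ∀ j : Int, 1 ≤ j → j < 6 * m → ¬((6:Int) ∣ j ∧ n ∣ j) := by
        rintro j hj1 hjL ⟨hj6, t, hjt⟩
        have ht1 : 1 ≤ t := by nlinarith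
        have ht2 : t ≤ 2 := by nlinarith
        interval_cases t
        · exact h6n (by omega : (6:Int) ∣ n)
        · have : (3:Int) ∣ n := by omega
          exact h3 this
      rw [loop_value n 2 3 m hn1 hm (by norm_num) (by norm_num) hmin]
      rw [e2]
      simp only [beq_iff_eq, if_neg e3]
      norm_num
      omega
    · -- g = 3 : n = 3*m, L = 6*m = 2*n
      have e2 : ¬ PySem.Int.mod n 2 = 0 :=
        fun h => h2 ((PySem.Int.mod_eq_zero_iff_dvd n 2).mp h)
      have e3 : PySem.Int.mod n 3 = 0 := (PySem.Int.mod_eq_zero_iff_dvd n 3).mpr h3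
      rcases h3 with ⟨m, hm⟩
      have hmin : ∀ j : Int, 1 ≤ j → j < 6 * m → ¬((6:Int) ∣ j ∧ n ∣ j) := by
        rintro j hj1 hjL ⟨hj6, t, hjt⟩
        have ht1 : 1 ≤ t := by nlinarith
        have ht2 : t ≤ 1 := by nlinarith
        interval_cases t
        exact h6n (by omega : (6:Int) ∣ n)
      rw [loop_value n 3 2 m hn1 hm (by norm_num) (by norm_num) hmin]
      rw [e3]
      simp only [beq_iff_eq, if_neg e2]
      norm_num
      omega
    · -- g = 1 : L = 6*n
      have e2 : ¬ PySem.Int.mod n 2 = 0 :=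
        fun h => h2 ((PySem.Int.mod_eq_zero_iff_dvd n 2).mp h)
      have e3 : ¬ PySem.Int.mod n 3 = 0 :=
        fun h => h3 ((PySem.Int.mod_eq_zero_iff_dvd n 3).mp h)
      have hmin : ∀ j : Int, 1 ≤ j → j < 6 * n → ¬((6:Int) ∣ j ∧ n ∣ j) := by
        rintro j hj1 hjL ⟨hj6, t, hjt⟩
        have ht1 : 1 ≤ t := by nlinarith
        have ht2 : t ≤ 5 := by nlinarith
        have hd2 : (2:Int) ∣ n * t := hjt ▸ (by omega : (2:Int) ∣ j)
        have hd3 : (3:Int) ∣ n * t := hjt ▸ (by omega : (3:Int) ∣ j)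
        have ht2' : (2:Int) ∣ t := prime_dvd_cofactor 2 Nat.prime_two n t
          (by exact_mod_cast h2) (by exact_mod_cast hd2)
        have ht3' : (3:Int) ∣ t := prime_dvd_cofactor 3 Nat.prime_three n t
          (by exact_mod_cast h3) (by exact_mod_cast hd3)
        omega
      rw [loop_value n 1 6 n hn1 (by ring) (by norm_num) (by norm_num) hmin]
      have hfd : PySem.Int.floordiv n 1 = n := by
        rw [PySem.Int.floordiv_eq_ediv_of_pos (by norm_num : (0:Int) < 1), Int.ediv_one]
      simp only [beq_iff_eq, if_neg e2, if_neg e3]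
      norm_num [hfd]

-- ===== VERDICT (by name: the statement is the Claim_ definition above) =====
theorem solution_spec : Claim_equal_solution := by
  intro n _ hpre
  unfold Spec_solution
  exact solution_eq_alt n hpre
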